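-- pv_equiv track=rewrite | github.com/esert/align_whitespace | python/align_cpp_block.py | get_trailing_terminator
-- ===== SOURCE A (Python) =====
-- def is_identifier_char(char: str) -> bool:
--     return char.isalnum() or char == "_"
--
-- def next_nonspace_char(text: str, index: int) -> str:
--     for next_index in range(index + 1, len(text)):
--         char = text[next_index]
--         if not char.isspace():
--             return char
--     return ""
--
-- def can_open_angle(text: str, index: int) -> bool:
--     if index == 0 or text[index - 1].isspace():
--         return False
--
--     prev_char = text[index - 1]
--     next_char = next_nonspace_char(text, index)
--     if not next_char:
--         return False
--
--     if not (is_identifier_char(prev_char) or prev_char in ">:])"):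
--         return False
--
--     return is_identifier_char(next_char) or next_char in ":<"
--
-- def pop_matching_delimiter(stack: list[str], char: str) -> None:
--     if not stack:
--         return
--
--     expected = {"(": ")", "[": "]", "{": "}", "<": ">"}[stack[-1]]
--     if char == expected:
--         stack.pop()
--
-- def get_trailing_terminator(text: str, terminators: set[str]) -> tuple[str, str] | None:
--     stripped = text.rstrip()
--     if not stripped or stripped[-1] not in terminators:
--         return None
--
--     end_index = len(stripped) - 1
--     stack: list[str] = []
--     in_string = ""
--     escaped = False
--
--     for index, char in enumerate(stripped):
--         if in_string:
--             if escaped: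
--                 escaped = False
--             elif char == "\\":
--                 escaped = True
--             elif char == in_string:
--                 in_string = ""
--             continue
--
--         if char in {'"', "'"}:
--             in_string = char
--             continue
--
--         if char in "([{":
--             stack.append(char)
--             continue
--
--         if char == "<" and can_open_angle(stripped, index):
--             stack.append(char)
--             continue
--
--         if char in ")]}":
--             pop_matching_delimiter(stack, char)
--             continue
--
--         if char == ">" and stack and stack[-1] == "<":
--             stack.pop()
--             continue
--
--         if index == end_index and char in terminators and not stack:
--             return stripped[:index].rstrip(), char
--
--     return None
-- ===== SOURCE B (Python) =====
-- _OPENER = {")": "(", "]": "[", "}": "{", ">": "<"}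
--
--
-- def _opens_angle(prev, nxt):
--     return (not prev.isspace()
--             and (prev.isalnum() or prev in "_>:])")
--             and (nxt.isalnum() or nxt in "_:<"))
--
--
-- def get_trailing_terminator(text, terminators):
--     s = text.rstrip()
--     if not s or s[-1] not in terminators:
--         return None
--     body, last = s[:-1], s[-1]
--     # stage 1 (backward): next non-space char strictly after each body position,
--     # seeded with the final char
--     nxts = []
--     cur = last
--     for ch in reversed(body):
--         nxts.append(cur)
--         if not ch.isspace():
--             cur = ch
--     nxts.reverse()
--     # stage 2 (forward): pure state machine over (prev, char, next) triples
--     stack = []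
--     mode = ""
--     esc = False
--     for prev, c, nx in zip([None] + list(body), body, nxts):
--         if mode:
--             if esc:
--                 esc = False
--             elif c == "\\":
--                 esc = True
--             elif c == mode:
--                 mode = ""
--         elif c in "\"'":
--             mode = c
--         elif c in "([{" or (c == "<" and prev is not None and _opens_angle(prev, nx)):
--             stack.append(c)
--         elif c in ")]}>" and stack and stack[-1] == _OPENER[c]:
--             stack.pop()
--     # stage 3: decide from the final state
--     if mode or stack or last in "\"'([{)]}":
--         return None
--     return body.rstrip(), last
-- ===== Notes on version B (the rewrite author's own statement) =====
-- stated objective: alternative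
-- what changed: B replaces A's per-'<' forward rescan for the next non-space character and in-loop early return by staged passes: one backward pass precomputing next-nonspace for every position (seeded with the final character), a single state-machine pass over (prev, char, next) triples using a uniform closer-to-opener map, and a decision computed from the final state; this removes the inner rescan (A is quadratic in the worst case) but was not measurably faster on the generated inputs.
import Mathlib
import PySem

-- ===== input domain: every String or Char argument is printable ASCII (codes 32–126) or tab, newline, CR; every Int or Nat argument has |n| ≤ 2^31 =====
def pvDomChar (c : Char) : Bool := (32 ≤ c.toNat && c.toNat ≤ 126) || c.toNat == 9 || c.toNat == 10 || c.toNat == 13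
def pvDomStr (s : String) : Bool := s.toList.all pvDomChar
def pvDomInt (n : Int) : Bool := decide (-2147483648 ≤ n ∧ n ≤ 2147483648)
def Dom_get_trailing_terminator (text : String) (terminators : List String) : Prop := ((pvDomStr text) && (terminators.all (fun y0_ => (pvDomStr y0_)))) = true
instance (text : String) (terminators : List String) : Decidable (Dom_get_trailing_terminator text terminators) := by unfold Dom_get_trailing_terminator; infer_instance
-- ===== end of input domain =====

-- B restructures A into staged passes: a backward next-nonspace precomputation, one fold of
-- a pure transition function over (prev, char, next) triples with a uniform closer→opener map,
-- and a decision from the final state (no per-'<' rescan, no in-loop early return).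

-- ===== PORT A =====

def isIdentifierChar (c : Char) : Bool := PySem.Chars.isalnum c || c == '_'

-- for next_index in range(index+1, len(text)): return first non-space char (forward scan)
def nextNonspaceChar (cs : List Char) (index : Nat) : Option Char :=
  (cs.drop (index + 1)).find? (fun c => !PySem.Chars.isspace c)

def canOpenAngle (cs : List Char) (index : Nat) : Bool :=
  if index = 0 then false
  else
    match cs[index - 1]? with
    | none => false
    | some prev =>
      if PySem.Chars.isspace prev then false
      else
        match nextNonspaceChar cs index with
        | none => false
        | some nextc =>
          -- prev_char in ">:])" / next_char in ":<" written as explicit 1-char comparisons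
          if !(isIdentifierChar prev || (prev == '>' || prev == ':' || prev == ']' || prev == ')')) then false
          else isIdentifierChar nextc || (nextc == ':' || nextc == '<')

-- stack: head = Python's stack[-1].  The dict lookup {…}[stack[-1]] is total here because
-- only '(', '[', '{', '<' are ever pushed; the final else returns '>' exactly for '<'.
def popMatchingDelimiter (stack : List Char) (c : Char) : List Char :=
  match stack with
  | [] => stack
  | top :: rest =>
    let expected : Char := if top == '(' then ')' else if top == '[' then ']' else if top == '{' then '}' else '>'
    if c == expected then rest else stack

-- the main for-loop of A; state = (stack, in_string, escaped); early return at end_index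
def loopA (cs : List Char) (terms : List String) (endIdx : Nat) :
    List Char → Nat → (List Char × Option Char × Bool) → Option (String × String)
  | [], _, _ => none
  | c :: rest, index, (stack, ins, esc) =>
    match ins with
    | some q =>
      if esc then loopA cs terms endIdx rest (index + 1) (stack, some q, false)
      else if c == '\\' then loopA cs terms endIdx rest (index + 1) (stack, some q, true)
      else if c == q then loopA cs terms endIdx rest (index + 1) (stack, none, esc)
      else loopA cs terms endIdx rest (index + 1) (stack, some q, esc)
    | none =>
      if c == '"' || c == '\'' then loopA cs terms endIdx rest (index + 1) (stack, some c, esc)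
      else if c == '(' || c == '[' || c == '{' then loopA cs terms endIdx rest (index + 1) (c :: stack, none, esc)
      else if c == '<' && canOpenAngle cs index then loopA cs terms endIdx rest (index + 1) ('<' :: stack, none, esc)
      else if c == ')' || c == ']' || c == '}' then loopA cs terms endIdx rest (index + 1) (popMatchingDelimiter stack c, none, esc)
      else if c == '>' && stack.head? == some '<' then loopA cs terms endIdx rest (index + 1) (stack.tail, none, esc)
      else if index == endIdx && terms.contains (String.ofList [c]) && stack.isEmpty then
        some (String.ofList (PySem.Chars.rstrip (cs.take index)), String.ofList [c])
      else loopA cs terms endIdx rest (index + 1) (stack, none, esc)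

def get_trailing_terminator (text : String) (terminators : List String) : Option (String × String) :=
  let stripped := PySem.Chars.rstrip text.toList
  match stripped.getLast? with
  | none => none
  | some lc =>
    if !terminators.contains (String.ofList [lc]) then none
    else loopA stripped terminators (stripped.length - 1) stripped 0 ([], none, false)

-- ===== PORT B =====

-- backward pass: position i ↦ first non-space char strictly after i, seeded with the final char
def buildNxt (lastC : Char) : List Char → List Char × Char
  | [] => ([], lastC)
  | c :: rest =>
    let p := buildNxt lastC rest
    (p.2 :: p.1, if PySem.Chars.isspace c then p.2 else c)

def opensAngle (p : Char) (n : Char) : Bool :=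
  !PySem.Chars.isspace p
    && (PySem.Chars.isalnum p || ['_', '>', ':', ']', ')'].contains p)
    && (PySem.Chars.isalnum n || ['_', ':', '<'].contains n)

-- the closer → opener dict {')':'(', ']':'[', '}':'{', '>':'<'} as an association list;
-- it is only consulted under a guard that makes the lookup succeed, so the getD default is dead
def openerOf (c : Char) : Char :=
  (([(')', '('), (']', '['), ('}', '{'), ('>', '<')].lookup c).getD '<')

def isQuoteOrBracket (c : Char) : Bool :=
  ['"', '\'', '(', '[', '{', ')', ']', '}'].contains c

-- the Python guard 'prev is not None and _opens_angle(prev, nx)'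
def angleOk (prev : Option Char) (nx : Char) : Bool :=
  match prev with
  | some p => opensAngle p nx
  | none => false

-- pure transition function, folded over the triples
def stepB (s : List Char × Option Char × Bool) (t : Option Char × Char × Char) :
    List Char × Option Char × Bool :=
  match s, t with
  | (stack, some q, esc), (_, c, _) =>
    if esc then (stack, some q, false)
    else if c == '\\' then (stack, some q, true)
    else if c == q then (stack, none, esc)
    else (stack, some q, esc)
  | (stack, none, esc), (prev, c, nx) =>
    if ['"', '\''].contains c then (stack, some c, esc)
    else if ['(', '[', '{'].contains c || (c == '<' && angleOk prev nx) then
      (c :: stack, none, esc)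
    else if [')', ']', '}', '>'].contains c && stack.head? == some (openerOf c) then
      (stack.tail, none, esc)
    else (stack, none, esc)

def get_trailing_terminator_alt (text : String) (terminators : List String) : Option (String × String) :=
  let s := PySem.Chars.rstrip text.toList
  match s.getLast? with
  | none => none
  | some lastC =>
    if terminators.contains (String.ofList [lastC]) then
      let body := s.dropLast
      let triples := (none :: body.map some).zip (body.zip (buildNxt lastC body).1)
      match triples.foldl stepB ([], none, false) with
      | (stack, mode, _) =>
        if mode.isSome || !stack.isEmpty || isQuoteOrBracket lastC then none
        else some (String.ofList (PySem.Chars.rstrip body), String.ofList [lastC])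
    else none

-- ===== PRECONDITION & SPEC =====
def Spec_get_trailing_terminator (text : String) (terminators : List String) (out : Option (String × String)) : Prop := out = get_trailing_terminator_alt text terminators
instance (text : String) (terminators : List String) (out : Option (String × String)) : Decidable (Spec_get_trailing_terminator text terminators out) := by unfold Spec_get_trailing_terminator; infer_instance

-- ===== CLAIM (what is proved, stated in full; the proofs are below) =====
def Claim_equal_get_trailing_terminator : Prop := ∀ (text : String) (terminators : List String), Dom_get_trailing_terminator text terminators → Spec_get_trailing_terminator text terminators (get_trailing_terminator text terminators)

-- ===== LEMMAS AND PROOFS =====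

-- proof-side pure state run of A's loop (same updates as loopA, no early return)
def runA (cs : List Char) : List Char → Nat → (List Char × Option Char × Bool) →
    (List Char × Option Char × Bool)
  | [], _, s => s
  | c :: rest, index, (stack, ins, esc) =>
    match ins with
    | some q =>
      if esc then runA cs rest (index + 1) (stack, some q, false)
      else if c == '\\' then runA cs rest (index + 1) (stack, some q, true)
      else if c == q then runA cs rest (index + 1) (stack, none, esc)
      else runA cs rest (index + 1) (stack, some q, esc)
    | none =>
      if c == '"' || c == '\'' then runA cs rest (index + 1) (stack, some c, esc)
      else if c == '(' || c == '[' || c == '{' then runA cs rest (index + 1) (c :: stack, none, esc)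
      else if c == '<' && canOpenAngle cs index then runA cs rest (index + 1) ('<' :: stack, none, esc)
      else if c == ')' || c == ']' || c == '}' then runA cs rest (index + 1) (popMatchingDelimiter stack c, none, esc)
      else if c == '>' && stack.head? == some '<' then runA cs rest (index + 1) (stack.tail, none, esc)
      else runA cs rest (index + 1) (stack, none, esc)

theorem runA_cons (cs : List Char) (c : Char) (rest : List Char) (i : Nat)
    (s : List Char × Option Char × Bool) :
    runA cs (c :: rest) i s = runA cs rest (i + 1) (runA cs [c] i s) := by
  obtain ⟨stack, ins, esc⟩ := s
  cases ins <;> simp only [runA] <;> split_ifs <;> rfl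

theorem loopA_cons (cs : List Char) (terms : List String) (endIdx : Nat) (c : Char)
    (rest : List Char) (index : Nat) (s : List Char × Option Char × Bool)
    (hne : (index == endIdx) = false) :
    loopA cs terms endIdx (c :: rest) index s
      = loopA cs terms endIdx rest (index + 1) (runA cs [c] index s) := by
  obtain ⟨stack, ins, esc⟩ := s
  cases ins <;> simp only [loopA, runA, hne, Bool.false_and] <;> split_ifs <;>
    first | rfl | exact False.elim (by assumption)

theorem loopA_peel (cs : List Char) (terms : List String) :
    ∀ (l : List Char) (c : Char) (i : Nat) (s : List Char × Option Char × Bool),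
    loopA cs terms (i + l.length) (l ++ [c]) i s
      = loopA cs terms (i + l.length) [c] (i + l.length) (runA cs l i s) := by
  intro l
  induction l with
  | nil => intro c i s; simp [runA]
  | cons d l' ih =>
    intro c i s
    have hlen : i + (d :: l').length = (i + 1) + l'.length := by simp [List.length_cons]; omega
    rw [hlen, List.cons_append,
      loopA_cons cs terms ((i + 1) + l'.length) d (l' ++ [c]) i s (by simp; omega),
      ih c (i + 1) (runA cs [d] i s), ← runA_cons]

theorem buildNxt_len (lc : Char) (cs : List Char) : (buildNxt lc cs).1.length = cs.length := by
  induction cs with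
  | nil => rfl
  | cons c rest ih => simp [buildNxt, ih]

theorem buildNxt_snd (lc : Char) (cs : List Char) :
    (buildNxt lc cs).2 = (cs.find? (fun c => !PySem.Chars.isspace c)).getD lc := by
  induction cs with
  | nil => rfl
  | cons c rest ih =>
    simp only [buildNxt, List.find?]
    by_cases h : PySem.Chars.isspace c <;> simp [h, ih]

theorem buildNxt_get (lc : Char) (cs : List Char) :
    ∀ (i : Nat), i < cs.length →
      (buildNxt lc cs).1[i]? = some (((cs.drop (i + 1)).find? (fun c => !PySem.Chars.isspace c)).getD lc) := by
  induction cs with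
  | nil => intro i h; simp at h
  | cons c rest ih =>
    intro i h
    cases i with
    | zero => simp [buildNxt, buildNxt_snd]
    | succ j =>
      have hj : j < rest.length := by simpa using h
      simpa [buildNxt] using ih j hj

theorem nextNonspace_append (body : List Char) (lc : Char)
    (hlc : PySem.Chars.isspace lc = false) (i : Nat) (hi : i < body.length) :
    nextNonspaceChar (body ++ [lc]) i
      = some (((body.drop (i + 1)).find? (fun c => !PySem.Chars.isspace c)).getD lc) := by
  unfold nextNonspaceChar
  rw [List.drop_append_of_le_length (by omega), List.find?_append]
  cases h : (body.drop (i + 1)).find? (fun c => !PySem.Chars.isspace c) with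
  | none => simp [List.find?, hlc]
  | some x => simp

theorem prevs_get (body : List Char) (i : Nat) (hi : i < body.length) :
    (none :: body.map some)[i]? = some (if h : i = 0 then none else some (body[i - 1]'(by omega))) := by
  cases i with
  | zero => rfl
  | succ j =>
    have hj : j < body.length := by omega
    simp [List.getElem?_map, List.getElem?_eq_getElem hj]

theorem canOpen_eq (cs : List Char) (i : Nat) (hi : i < cs.length) (nx : Char)
    (hnx : nextNonspaceChar cs i = some nx) :
    canOpenAngle cs i = (if h : i = 0 then false else opensAngle (cs[i - 1]'(by omega)) nx) := by
  cases i with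
  | zero => simp [canOpenAngle]
  | succ j =>
    have hj : j < cs.length := by omega
    simp only [canOpenAngle, opensAngle, Nat.succ_ne_zero, Nat.add_sub_cancel, dif_neg,
      not_false_iff, List.contains_cons, List.contains_nil, Bool.or_false]
    rw [List.getElem?_eq_getElem hj, hnx]
    by_cases hs : PySem.Chars.isspace cs[j]
    · simp [hs]
    · by_cases hX : (isIdentifierChar cs[j] || (cs[j] == '>' || cs[j] == ':' || cs[j] == ']' || cs[j] == ')')) = true
      · simp only [hX, Bool.not_true]
        simp only [isIdentifierChar, Bool.or_assoc] at hX
        simp [hs, hX, isIdentifierChar, Bool.or_assoc]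
      · simp only [hX, Bool.not_false, if_true]
        simp only [isIdentifierChar, Bool.or_assoc] at hX
        simp [hs, hX, Bool.or_assoc]

theorem openerOf_paren : openerOf ')' = '(' := by decide
theorem openerOf_sq : openerOf ']' = '[' := by decide
theorem openerOf_curly : openerOf '}' = '{' := by decide
theorem openerOf_gt : openerOf '>' = '<' := by decide

theorem popMatch_eq (stack : List Char) (c : Char) (hc : c = ')' ∨ c = ']' ∨ c = '}') :
    popMatchingDelimiter stack c = if stack.head? == some (openerOf c) then stack.tail else stack := by
  cases stack with
  | nil => rcases hc with rfl | rfl | rfl <;> rfl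
  | cons top rest =>
    simp only [popMatchingDelimiter, List.head?, List.tail]
    rcases hc with rfl | rfl | rfl <;>
      · by_cases h1 : top = '(' <;> by_cases h2 : top = '[' <;> by_cases h3 : top = '{' <;>
          simp [h1, h2, h3, openerOf_paren, openerOf_sq, openerOf_curly] <;>
            split_ifs <;> simp_all

theorem step_eq (cs : List Char) (i : Nat) (prev : Option Char) (nx : Char)
    (hco : canOpenAngle cs i = angleOk prev nx)
    (s : List Char × Option Char × Bool) (c : Char) :
    stepB s (prev, c, nx) = runA cs [c] i s := by
  obtain ⟨stack, ins, esc⟩ := s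
  cases ins with
  | some q => simp only [stepB, runA]
  | none =>
    simp only [stepB, runA, hco, List.contains_cons, List.contains_nil, Bool.or_false,
      Bool.or_assoc]
    cases hq : (c == '"' || c == '\'') with
    | true => simp [hq]
    | false =>
      cases hob : (c == '(' || (c == '[' || c == '{')) with
      | true =>
        have hc3 : c = '(' ∨ c = '[' ∨ c = '{' := by
          rcases (Bool.or_eq_true _ _).mp hob with h | h
          · exact Or.inl (eq_of_beq h)
          · rcases (Bool.or_eq_true _ _).mp h with h | h
            · exact Or.inr (Or.inl (eq_of_beq h))
            · exact Or.inr (Or.inr (eq_of_beq h))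
        rcases hc3 with rfl | rfl | rfl <;> simp
      | false =>
        cases hang : (c == '<' && angleOk prev nx) with
        | true =>
          have hc : c = '<' := eq_of_beq ((Bool.and_eq_true _ _).mp hang).1
          simp [hq, hob, hang, hc]
        | false =>
          cases hcl : (c == ')' || (c == ']' || c == '}')) with
          | true =>
            have hc' : c = ')' ∨ c = ']' ∨ c = '}' := by
              rcases (Bool.or_eq_true _ _).mp hcl with h | h
              · exact Or.inl (eq_of_beq h)
              · rcases (Bool.or_eq_true _ _).mp h with h | h
                · exact Or.inr (Or.inl (eq_of_beq h))
                · exact Or.inr (Or.inr (eq_of_beq h))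
            rw [popMatch_eq stack c hc']
            rcases hc' with rfl | rfl | rfl <;>
              simp [openerOf_paren, openerOf_sq, openerOf_curly] <;> split_ifs <;> simp_all
          | false =>
            cases hgt : (c == '>' && stack.head? == some '<') with
            | true =>
              have hc : c = '>' := eq_of_beq ((Bool.and_eq_true _ _).mp hgt).1
              have hh := ((Bool.and_eq_true _ _).mp hgt).2
              subst hc
              simp [hq, hob, hang, hcl, hgt, openerOf_gt, hh]
            | false =>
              simp [hq, hob, hang, hcl, hgt]
              intro h1 h2
              have hc9 : c = '>' := by
                rcases h1 with rfl | rfl | rfl | rfl <;> simp_all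
              subst hc9
              rw [openerOf_gt] at h2
              simp_all

theorem foldB_bridge (body : List Char) (lc : Char) (hlc : PySem.Chars.isspace lc = false) :
    ∀ (l : List Char) (i : Nat) (s : List Char × Option Char × Bool),
      body.drop i = l →
      (((none :: body.map some).drop i).zip (l.zip ((buildNxt lc body).1.drop i))).foldl stepB s
        = runA (body ++ [lc]) l i s := by
  intro l
  induction l with
  | nil => intro i s _; simp [runA]
  | cons c rest ih =>
    intro i s hl
    have hi : i < body.length := by
      by_contra h
      rw [List.drop_eq_nil_of_le (by omega)] at hl
      simp at hl
    have hib : i < (buildNxt lc body).1.length := by rw [buildNxt_len]; exact hi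
    have hip : i < (none :: body.map some).length := by simp; omega
    have hc : body[i] = c := by
      have h2 := List.drop_eq_getElem_cons hi (l := body)
      rw [hl] at h2
      exact ((List.cons.injEq _ _ _ _).mp h2).1.symm
    have hrest : body.drop (i + 1) = rest := by
      have h2 := List.drop_eq_getElem_cons hi (l := body)
      rw [hl] at h2
      exact ((List.cons.injEq _ _ _ _).mp h2).2.symm
    set nx : Char := ((body.drop (i + 1)).find? (fun c => !PySem.Chars.isspace c)).getD lc with hnxdef
    set pv : Option Char := if h : i = 0 then none else some (body[i - 1]'(by omega)) with hpvdef
    have hnxl : (buildNxt lc body).1.drop i = nx :: (buildNxt lc body).1.drop (i + 1) := by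
      rw [List.drop_eq_getElem_cons hib]
      have h3 := buildNxt_get lc body i hi
      rw [List.getElem?_eq_getElem hib] at h3
      simp only [Option.some.injEq] at h3
      rw [h3]
    have hpvl : (none :: body.map some).drop i = pv :: (none :: body.map some).drop (i + 1) := by
      rw [List.drop_eq_getElem_cons hip]
      have h3 := prevs_get body i hi
      rw [List.getElem?_eq_getElem hip] at h3
      simp only [Option.some.injEq] at h3
      rw [h3]
    have hnxeq : nextNonspaceChar (body ++ [lc]) i = some nx :=
      nextNonspace_append body lc hlc i hi
    have hco : canOpenAngle (body ++ [lc]) i = angleOk pv nx := by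
      rw [canOpen_eq (body ++ [lc]) i (by simp; omega) nx hnxeq]
      by_cases h0 : i = 0
      · simp [h0, hpvdef, angleOk]
      · have hi1 : i - 1 < body.length := by omega
        simp only [hpvdef, dif_neg h0, angleOk]
        congr 1
        exact List.getElem_append_left hi1
    rw [hnxl, hpvl, List.zip_cons_cons, List.zip_cons_cons, List.foldl_cons, runA_cons,
      step_eq (body ++ [lc]) i pv nx hco s c]
    exact ih (i + 1) _ hrest

theorem loopA_last (cs : List Char) (terms : List String) (e : Nat) (c : Char)
    (stack : List Char) (ins : Option Char) (esc : Bool)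
    (hnx : nextNonspaceChar cs e = none)
    (hc : terms.contains (String.ofList [c]) = true) :
    loopA cs terms e [c] e (stack, ins, esc)
      = (if ins.isSome || !stack.isEmpty || isQuoteOrBracket c then none
         else some (String.ofList (PySem.Chars.rstrip (cs.take e)), String.ofList [c])) := by
  have hca : canOpenAngle cs e = false := by
    unfold canOpenAngle
    split_ifs with h
    · rfl
    · cases hg : cs[e - 1]? with
      | none => rfl
      | some p =>
        simp only [hnx]
        split_ifs <;> rfl
  cases ins with
  | some q =>
    simp only [loopA, Option.isSome, Bool.true_or, if_true]
    split_ifs <;> rfl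
  | none =>
    simp only [loopA, hca, Option.isSome, Bool.and_false, Bool.false_eq_true, if_false,
      beq_self_eq_true, Bool.true_and, hc, isQuoteOrBracket, Bool.false_or,
      List.contains_cons, List.contains_nil, Bool.or_false, Bool.or_assoc]
    cases stack <;> split_ifs <;> simp_all

theorem rstrip_getLast_not_space (l : List Char) (c : Char)
    (h : (PySem.Chars.rstrip l).getLast? = some c) : PySem.Chars.isspace c = false := by
  unfold PySem.Chars.rstrip at h
  rw [List.getLast?_reverse] at h
  have := List.head?_dropWhile_not (p := PySem.Chars.isspace) (l := l.reverse)
  rw [h] at this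
  simpa using this

-- ===== VERDICT (by name: the statement is the Claim_ definition above) =====
theorem get_trailing_terminator_spec : Claim_equal_get_trailing_terminator := by
  intro text terms _
  show get_trailing_terminator text terms = get_trailing_terminator_alt text terms
  simp only [get_trailing_terminator, get_trailing_terminator_alt]
  cases hlast : (PySem.Chars.rstrip text.toList).getLast? with
  | none => rfl
  | some lc =>
    set cs := PySem.Chars.rstrip text.toList with hcs
    simp only []
    by_cases hterm : terms.contains (String.ofList [lc]) = true
    · simp only [hterm, Bool.not_true, Bool.false_eq_true, if_false, if_true]
      have hne : cs ≠ [] := by intro h; rw [h] at hlast; simp at hlast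
      have hlc : PySem.Chars.isspace lc = false := rstrip_getLast_not_space text.toList lc (hcs ▸ hlast)
      have hdecomp : cs.dropLast ++ [lc] = cs := by
        have h2 := List.dropLast_append_getLast hne
        rwa [List.getLast_eq_iff_getLast?_eq_some hne |>.mpr hlast] at h2
      have hA : loopA cs terms (cs.length - 1) cs 0 ([], none, false)
          = loopA cs terms (cs.length - 1) [lc] (cs.length - 1) (runA cs cs.dropLast 0 ([], none, false)) := by
        have hp := loopA_peel cs terms cs.dropLast lc 0 ([], none, false)
        rw [hdecomp] at hp
        have hl0 : 0 + cs.dropLast.length = cs.length - 1 := by simp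
        rwa [hl0] at hp
      have hB := foldB_bridge cs.dropLast lc hlc cs.dropLast 0 ([], none, false) rfl
      rw [List.drop_zero, List.drop_zero, hdecomp] at hB
      have hnx : nextNonspaceChar cs (cs.length - 1) = none := by
        unfold nextNonspaceChar
        rw [List.drop_eq_nil_of_le (by omega)]
        rfl
      rw [hA, hB]
      obtain ⟨stack, ins, esc⟩ := runA cs cs.dropLast 0 ([], none, false)
      rw [loopA_last cs terms (cs.length - 1) lc stack ins esc hnx hterm,
        ← List.dropLast_eq_take]
    · simp only [Bool.not_eq_true] at hterm
      rw [hterm]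
      simp
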